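-- pv_equiv track=rewrite | github.com/NRCan/DataHub-Databricks | projects/AC/~/audit_sample.py | scan_expression
-- ===== SOURCE A (Python) =====
-- def scan_expression(text: str) -> list[str]:
--     output = []
--     string = []
--     for c in text:
--         if string:
--             string.append(c)
--             if c == "'":
--                 output.append("".join(string))
--                 string = []
--         else:
--             if c == "'":
--                 string = [c]
--             else:
--                 output.append(c)
--     return output
-- ===== SOURCE B (Python) =====
-- def scan_expression(text: str) -> list[str]:
--     output = []
--     i = 0
--     n = len(text)
--     while i < n:
--         if text[i] == "'":
--             j = text.find("'", i + 1)
--             if j == -1: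
--                 break
--             output.append(text[i:j + 1])
--             i = j + 1
--         else:
--             output.append(text[i])
--             i += 1
--     return output
-- ===== Notes on version B (the rewrite author's own statement) =====
-- stated objective: idiomatic
-- what changed: Replaces the carried character-buffer state machine by an index-driven while loop that jumps over each quoted literal with str.find, slicing the whole token at once instead of accumulating characters one by one.
import Mathlib
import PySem

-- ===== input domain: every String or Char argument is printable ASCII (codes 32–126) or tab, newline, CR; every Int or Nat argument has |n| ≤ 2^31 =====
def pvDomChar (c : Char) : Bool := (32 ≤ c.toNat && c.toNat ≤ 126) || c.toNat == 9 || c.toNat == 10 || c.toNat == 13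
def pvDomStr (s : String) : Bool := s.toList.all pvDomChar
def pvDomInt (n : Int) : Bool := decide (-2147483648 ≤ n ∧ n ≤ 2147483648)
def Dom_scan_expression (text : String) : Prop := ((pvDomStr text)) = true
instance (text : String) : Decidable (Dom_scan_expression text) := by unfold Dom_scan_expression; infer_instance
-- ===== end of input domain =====

-- B replaces A's carried character-buffer state machine by an index-driven scan that
-- jumps over each quoted literal in one step (more idiomatic; same O(n) cost).

-- ===== PORT A =====
-- A's for-loop with state (output, string); output grows at the tail like Python's append.
def scanAGo : List Char → List Char → List String → List String
  | [], _, output => output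
  | c :: rest, string, output =>
    if string ≠ [] then
      let string' := string ++ [c]
      if c = '\'' then scanAGo rest [] (output ++ [String.ofList string'])
      else scanAGo rest string' output
    else
      if c = '\'' then scanAGo rest [c] output
      else scanAGo rest string (output ++ [String.ofList [c]])

def scan_expression (text : String) : List String := scanAGo text.toList [] []

-- ===== PORT B =====
-- B's while loop over an index i: `text.find("'", i+1)` is scanning the remaining
-- characters for the next quote, i.e. takeWhile/dropWhile (· ≠ '\'') on the rest
-- (exact: find returns -1 iff dropWhile yields []); text[i:j+1] is the opening
-- quote, the scanned characters and the closing quote.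
def scanBGo : List Char → List String
  | [] => []
  | c :: rest =>
    if c = '\'' then
      match h : rest.dropWhile (· ≠ '\'') with
      | [] => []
      | _ :: post =>
          String.ofList ('\'' :: rest.takeWhile (· ≠ '\'') ++ ['\'']) :: scanBGo post
    else String.ofList [c] :: scanBGo rest
termination_by cs => cs.length
decreasing_by
  · have hs := (List.dropWhile_sublist (p := fun x => decide ¬x = '\'') (l := rest)).length_le
    rw [h] at hs
    simp at hs
    simp
    omega
  · simp

def scan_expression_alt (text : String) : List String := scanBGo text.toList

-- ===== PRECONDITION & SPEC =====
def Spec_scan_expression (text : String) (out : List String) : Prop := out = scan_expression_alt text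
instance (text : String) (out : List String) : Decidable (Spec_scan_expression text out) := by unfold Spec_scan_expression; infer_instance

-- ===== CLAIM (what is proved, stated in full; the proofs are below) =====
def Claim_equal_scan_expression : Prop := ∀ (text : String), Dom_scan_expression text → Spec_scan_expression text (scan_expression text)

-- ===== LEMMAS AND PROOFS =====

-- What A produces once it is inside a string literal with buffer `buf`.
def insideResult (buf : List Char) (cs : List Char) : List String :=
  match cs.dropWhile (· ≠ '\'') with
  | [] => []
  | _ :: post => String.ofList (buf ++ cs.takeWhile (· ≠ '\'') ++ ['\'']) :: scanBGo post

theorem scanAGo_out (cs : List Char) : ∀ (string : List Char) (out : List String),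
    scanAGo cs string out = out ++ scanAGo cs string [] := by
  induction cs with
  | nil => intro s out; simp [scanAGo]
  | cons c rest ih =>
    intro s out
    simp only [scanAGo]
    split_ifs with h1 h2 h3
    · rw [ih [] (out ++ _), ih [] ([] ++ _)]; simp
    · exact ih _ _
    · exact ih _ _
    · rw [ih s (out ++ _), ih s ([] ++ _)]; simp

theorem scanAGo_main (n : ℕ) : ∀ (cs : List Char), cs.length ≤ n → ∀ (buf : List Char),
    scanAGo cs buf [] = if buf = [] then scanBGo cs else insideResult buf cs := by
  induction n with
  | zero =>
    intro cs hlen buf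
    have : cs = [] := List.eq_nil_of_length_eq_zero (Nat.le_zero.mp hlen)
    subst this
    simp [scanAGo, scanBGo, insideResult]
  | succ n ih =>
    intro cs hlen buf
    match cs with
    | [] => simp [scanAGo, scanBGo, insideResult]
    | c :: rest =>
      have hr : rest.length ≤ n := by simpa using hlen
      by_cases hb : buf = []
      · subst hb
        simp only [scanAGo, ne_eq, not_true_eq_false, if_false, reduceIte]
        by_cases hc : c = '\''
        · subst hc
          rw [if_pos rfl, ih rest hr ['\'']]
          have h1 : (['\''] : List Char) ≠ [] := by simp
          rw [if_neg h1, show scanBGo ('\'' :: rest) = insideResult ['\''] rest from by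
            unfold scanBGo insideResult
            rw [if_pos rfl]
            cases hdw : rest.dropWhile (· ≠ '\'') <;> simp [hdw]]
        · simp only [if_neg hc]
          rw [scanAGo_out, ih rest hr []]
          simp [scanBGo, hc]
      · simp only [scanAGo, if_pos, hb, ne_eq, not_false_eq_true, reduceIte]
        by_cases hc : c = '\''
        · subst hc
          rw [if_pos rfl, scanAGo_out, ih rest hr []]
          simp only [insideResult, List.dropWhile]
          simp
        · simp only [if_neg hc]
          rw [ih rest hr (buf ++ [c])]
          have hbc : buf ++ [c] ≠ [] := by simp
          simp only [if_neg hbc, insideResult, List.dropWhile, List.takeWhile]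
          have : (decide ¬c = '\'') = true := by simp [hc]
          rw [this]
          simp

-- ===== VERDICT (by name: the statement is the Claim_ definition above) =====
theorem scan_expression_spec : Claim_equal_scan_expression := by
  intro text _
  unfold Spec_scan_expression scan_expression scan_expression_alt
  rw [scanAGo_main text.toList.length text.toList le_rfl []]
  simp
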